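-- pv_equiv track=rewrite | github.com/garciparedes/advent-of-code | 2019/10_monitoring_station_part_2.py | compute_groups
-- ===== SOURCE A (Python) =====
-- from collections import defaultdict
-- from typing import List, Tuple, Dict, Optional
--
-- def check_if_between(current: Tuple[int, int], target: Tuple[int, int], point: Tuple[int, int]) -> bool:
--     dxc = point[0] - current[0]
--     dyc = point[1] - current[1]
--
--     dxl = target[0] - current[0]
--     dyl = target[1] - current[1]
--
--     if dxc * dyl - dyc * dxl != 0:
--         return False
--
--     if abs(dxl) >= abs(dyl):
--         if dxl > 0:
--             return current[0] <= point[0] <= target[0]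
--         else:
--             return target[0] <= point[0] <= current[0]
--
--     else:
--         if dyl > 0:
--             return current[1] <= point[1] <= target[1]
--         else:
--             return target[1] <= point[1] <= current[1]
--
-- def check_if_obstacle(current: Tuple[int, int], target: Tuple[int, int],
--                       points: List[Tuple[int, int]]) -> Optional[Tuple[int, int]]:
--     for point in points:
--         if current == point:
--             continue
--         if target == point:
--             continue
--         if check_if_between(current, target, point):
--             return point
--     return None
--
-- def compute_groups(current: Tuple[int, int], points: Tuple[Tuple[int, int], ...]):
--     points = sorted(points, key=lambda x: abs(x[0] - current[0]) + abs(x[1] - current[1]))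
--
--     groups = defaultdict(list)
--     for i, point in enumerate(points):
--         if point == current:
--             continue
--         obstacle = check_if_obstacle(current, point, points[:i])
--         if obstacle is None:
--             obstacle = point
--         groups[obstacle].append(point)
--     return groups
-- ===== SOURCE B (Python) =====
-- from math import gcd
--
--
-- def compute_groups(current, points):
--     points = sorted(points, key=lambda x: abs(x[0] - current[0]) + abs(x[1] - current[1]))
--     key_of = {}   # reduced direction vector -> closest point in that direction
--     groups = {}
--     for point in points:
--         if point == current:
--             continue
--         dx = point[0] - current[0]
--         dy = point[1] - current[1]
--         g = gcd(dx, dy)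
--         direction = (dx // g, dy // g)
--         key = key_of.setdefault(direction, point)
--         groups.setdefault(key, []).append(point)
--     return groups
-- ===== Notes on version B (the rewrite author's own statement) =====
-- stated objective: faster
-- what changed: A finds each point's group key by rescanning the whole sorted prefix for a blocking point (O(n^2)); B groups points by their gcd-reduced direction vector in a dict during a single pass over the distance-sorted list, keying each group by its first (closest) point.
import Mathlib
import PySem

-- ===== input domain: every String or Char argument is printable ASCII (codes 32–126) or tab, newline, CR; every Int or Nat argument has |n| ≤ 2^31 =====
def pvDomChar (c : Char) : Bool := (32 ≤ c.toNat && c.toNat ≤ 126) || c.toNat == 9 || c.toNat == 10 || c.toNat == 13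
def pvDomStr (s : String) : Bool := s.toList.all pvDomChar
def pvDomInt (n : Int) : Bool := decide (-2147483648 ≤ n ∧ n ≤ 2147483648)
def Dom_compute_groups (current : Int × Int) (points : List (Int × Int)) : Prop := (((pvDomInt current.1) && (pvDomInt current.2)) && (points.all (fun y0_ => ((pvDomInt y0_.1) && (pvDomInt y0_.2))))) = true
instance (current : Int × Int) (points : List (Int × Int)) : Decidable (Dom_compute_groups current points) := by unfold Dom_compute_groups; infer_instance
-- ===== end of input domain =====

-- B replaces A's per-point backward scan for an obstacle (O(n^2)) by grouping points on their
-- gcd-reduced direction vector in a dict during one pass over the distance-sorted list.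

-- ===== PORT A =====
def check_if_between (current target point : Int × Int) : Bool :=
  let dxc := point.1 - current.1
  let dyc := point.2 - current.2
  let dxl := target.1 - current.1
  let dyl := target.2 - current.2
  if dxc * dyl - dyc * dxl ≠ 0 then
    false
  else if |dxl| ≥ |dyl| then
    (if dxl > 0 then decide (current.1 ≤ point.1 ∧ point.1 ≤ target.1)
     else decide (target.1 ≤ point.1 ∧ point.1 ≤ current.1))
  else
    (if dyl > 0 then decide (current.2 ≤ point.2 ∧ point.2 ≤ target.2)
     else decide (target.2 ≤ point.2 ∧ point.2 ≤ current.2))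

def check_if_obstacle (current target : Int × Int) : List (Int × Int) → Option (Int × Int)
  | [] => none
  | point :: rest =>
    if current = point then check_if_obstacle current target rest
    else if target = point then check_if_obstacle current target rest
    else if check_if_between current target point then some point
    else check_if_obstacle current target rest

-- defaultdict(list): groups[obstacle].append(point) is modify with default []
def compute_groups (current : Int × Int) (points : List (Int × Int)) : List (Int × Int × List (Int × Int)) :=
  let pts := PySem.List.sorted points (fun x => |x.1 - current.1| + |x.2 - current.2|)
  let groups : PySem.Dict (Int × Int) (List (Int × Int)) :=
    (PySem.List.enumerate pts).foldl (fun groups ip =>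
      if ip.2 = current then groups
      else
        let obstacle := check_if_obstacle current ip.2 (PySem.List.slice pts none (some ip.1))
        let key := obstacle.getD ip.2
        groups.modify key [] (fun l => l ++ [ip.2])) PySem.Dict.empty
  groups.items.map (fun kv => (kv.1.1, kv.1.2, kv.2))

-- ===== PORT B =====
def pvDirection (current point : Int × Int) : Int × Int :=
  let dx := point.1 - current.1
  let dy := point.2 - current.2
  let g : Int := Int.gcd dx dy
  (PySem.Int.floordiv dx g, PySem.Int.floordiv dy g)

-- key_of.setdefault(d, p) returns the stored value ((get? d).getD p) and inserts p only if absent;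
-- groups.setdefault(key, []).append(point) mutates the stored list: modify with default []
def compute_groups_alt (current : Int × Int) (points : List (Int × Int)) : List (Int × Int × List (Int × Int)) :=
  let pts := PySem.List.sorted points (fun x => |x.1 - current.1| + |x.2 - current.2|)
  let st :=
    pts.foldl (fun (st : PySem.Dict (Int × Int) (Int × Int) × PySem.Dict (Int × Int) (List (Int × Int))) point =>
      if point = current then st
      else
        let direction := pvDirection current point
        let key := (st.1.get? direction).getD point
        (st.1.setdefault direction point, st.2.modify key [] (fun l => l ++ [point])))
      (PySem.Dict.empty, PySem.Dict.empty)
  st.2.items.map (fun kv => (kv.1.1, kv.1.2, kv.2))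

-- ===== PRECONDITION & SPEC =====
def Spec_compute_groups (current : Int × Int) (points : List (Int × Int)) (out : List (Int × Int × List (Int × Int))) : Prop := out = compute_groups_alt current points
instance (current : Int × Int) (points : List (Int × Int)) (out : List (Int × Int × List (Int × Int))) : Decidable (Spec_compute_groups current points out) := by unfold Spec_compute_groups; infer_instance

-- ===== CLAIM (what is proved, stated in full; the proofs are below) =====
def Claim_equal_compute_groups : Prop := ∀ (current : Int × Int) (points : List (Int × Int)), Dom_compute_groups current points → Spec_compute_groups current points (compute_groups current points)

-- ===== LEMMAS AND PROOFS =====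

-- L1 distance from c (the sort key of both ports)
def pvKey (c x : Int × Int) : Int := |x.1 - c.1| + |x.2 - c.2|

-- gcd-reduced vector, with exact (Euclidean) division
def pvRed (x y : Int) : Int × Int := (x / (Int.gcd x y : Int), y / (Int.gcd x y : Int))

def pvDir (c p : Int × Int) : Int × Int := pvRed (p.1 - c.1) (p.2 - c.2)

lemma pv_ne_zero {c p : Int × Int} (h : p ≠ c) : ¬(p.1 - c.1 = 0 ∧ p.2 - c.2 = 0) := by
  rintro ⟨h1, h2⟩
  exact h (Prod.ext_iff.mpr ⟨by omega, by omega⟩)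

lemma pvRep (x y : Int) (h : ¬(x = 0 ∧ y = 0)) :
    ∃ (g u1 u2 : Int), pvRed x y = (u1, u2) ∧ x = g * u1 ∧ y = g * u2 ∧ 0 < g ∧ Int.gcd u1 u2 = 1 := by
  have hpos : 0 < Int.gcd x y := Int.gcd_pos_iff.mpr (by tauto)
  refine ⟨(Int.gcd x y : Int), x / (Int.gcd x y : Int), y / (Int.gcd x y : Int), rfl, ?_, ?_, ?_, ?_⟩
  · rw [mul_comm]; exact (Int.ediv_mul_cancel (Int.gcd_dvd_left x y)).symm
  · rw [mul_comm]; exact (Int.ediv_mul_cancel (Int.gcd_dvd_right x y)).symm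
  · exact_mod_cast hpos
  · exact Int.gcd_div_gcd_div_gcd hpos

lemma pvRed_scale (t u1 u2 : Int) (ht : 0 < t) (hu : Int.gcd u1 u2 = 1) :
    pvRed (t * u1) (t * u2) = (u1, u2) := by
  have hg : ((t * u1).gcd (t * u2) : Int) = t := by
    rw [Int.gcd_mul_left, hu, mul_one]
    exact Int.natAbs_of_nonneg ht.le
  unfold pvRed
  rw [hg, Int.mul_ediv_cancel_left _ ht.ne', Int.mul_ediv_cancel_left _ ht.ne']

lemma pvPar (u1 u2 x y : Int) (hu : Int.gcd u1 u2 = 1) (h : x * u2 = y * u1) :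
    ∃ t, x = t * u1 ∧ y = t * u2 := by
  by_cases h1 : u1 = 0
  · subst h1
    have hu2 : u2 = 1 ∨ u2 = -1 := by
      have : u2.natAbs = 1 := by simpa [Int.gcd] using hu
      rcases Int.natAbs_eq_iff.mp this with h' | h' <;> simp [h'] 
    have hx : x = 0 := by
      rcases hu2 with h' | h' <;> subst h' <;> omega
    exact ⟨y * u2, by simp [hx], by rcases hu2 with h' | h' <;> subst h' <;> ring⟩
  · have hdvd : u1 ∣ x := by
      have hc : IsCoprime u1 u2 := Int.isCoprime_iff_gcd_eq_one.mpr hu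
      exact hc.dvd_of_dvd_mul_right ⟨y, by linarith [h]⟩
    refine ⟨x / u1, (Int.ediv_mul_cancel hdvd).symm, ?_⟩
    have hx : x = x / u1 * u1 := (Int.ediv_mul_cancel hdvd).symm
    have : y * u1 = (x / u1 * u2) * u1 := by rw [← h]; nth_rewrite 1 [hx]; ring
    exact mul_right_cancel₀ h1 this

lemma pvBndIff (g t u : Int) (hg : 0 < g) (hu : u ≠ 0) :
    (if g * u > 0 then 0 ≤ t * u ∧ t * u ≤ g * u else g * u ≤ t * u ∧ t * u ≤ 0) ↔ (0 ≤ t ∧ t ≤ g) := by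
  by_cases hpos : 0 < u
  · rw [if_pos (mul_pos hg hpos)]
    constructor
    · rintro ⟨h1, h2⟩
      exact ⟨nonneg_of_mul_nonneg_right (by linarith [h1]) hpos, le_of_mul_le_mul_right h2 hpos⟩
    · rintro ⟨h1, h2⟩
      exact ⟨mul_nonneg h1 hpos.le, mul_le_mul_of_nonneg_right h2 hpos.le⟩
  · have hneg : u < 0 := lt_of_le_of_ne (not_lt.mp hpos) hu
    rw [if_neg (by nlinarith)]
    constructor
    · rintro ⟨h1, h2⟩
      exact ⟨by nlinarith, by nlinarith⟩
    · rintro ⟨h1, h2⟩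
      exact ⟨by nlinarith, by nlinarith⟩

lemma pvCore (x1 y1 x2 y2 : Int) (ha : ¬(x1 = 0 ∧ y1 = 0)) (hb : ¬(x2 = 0 ∧ y2 = 0)) :
    (x1 * y2 - y1 * x2 = 0 ∧
      (if |x2| ≥ |y2| then (if x2 > 0 then 0 ≤ x1 ∧ x1 ≤ x2 else x2 ≤ x1 ∧ x1 ≤ 0)
       else (if y2 > 0 then 0 ≤ y1 ∧ y1 ≤ y2 else y2 ≤ y1 ∧ y1 ≤ 0)))
    ↔ (pvRed x1 y1 = pvRed x2 y2 ∧ |x1| + |y1| ≤ |x2| + |y2|) := by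
  obtain ⟨g2, u1, u2, hred2, hx2, hy2, hg2, hu⟩ := pvRep x2 y2 hb
  have hu0 : ¬(u1 = 0 ∧ u2 = 0) := by
    rintro ⟨e1, e2⟩; exact hb ⟨by rw [hx2, e1, mul_zero], by rw [hy2, e2, mul_zero]⟩
  have hax2 : |x2| = g2 * |u1| := by rw [hx2, abs_mul, abs_of_pos hg2]
  have hay2 : |y2| = g2 * |u2| := by rw [hy2, abs_mul, abs_of_pos hg2]
  have hu1ne : |x2| ≥ |y2| → u1 ≠ 0 := by
    intro h1
    rintro rfl
    have hx20 : x2 = 0 := by rw [hx2]; ring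
    have hy20 : y2 = 0 := abs_nonpos_iff.mp (by rw [hx20] at h1; simpa using h1)
    exact hb ⟨hx20, hy20⟩
  have hu2ne : ¬(|x2| ≥ |y2|) → u2 ≠ 0 := by
    intro h1
    rintro rfl
    have hy20 : y2 = 0 := by rw [hy2]; ring
    exact h1 (by rw [hy20]; simp [abs_nonneg x2])
  have hbndIff : ∀ t : Int,
      ((if |x2| ≥ |y2| then (if x2 > 0 then 0 ≤ t * u1 ∧ t * u1 ≤ x2 else x2 ≤ t * u1 ∧ t * u1 ≤ 0)
        else (if y2 > 0 then 0 ≤ t * u2 ∧ t * u2 ≤ y2 else y2 ≤ t * u2 ∧ t * u2 ≤ 0))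
       ↔ (0 ≤ t ∧ t ≤ g2)) := by
    intro t
    by_cases h1 : |x2| ≥ |y2|
    · rw [if_pos h1, hx2]
      exact pvBndIff g2 t u1 hg2 (hu1ne h1)
    · rw [if_neg h1, hy2]
      exact pvBndIff g2 t u2 hg2 (hu2ne h1)
  constructor
  · rintro ⟨hcross, hbnd⟩
    have hpar : x1 * u2 = y1 * u1 := by
      have h' : g2 * (x1 * u2 - y1 * u1) = 0 := by
        rw [hx2, hy2] at hcross; linear_combination hcross
      rcases mul_eq_zero.mp h' with h' | h'
      · exact absurd h' hg2.ne'
      · linarith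
    obtain ⟨t, ht1, ht2⟩ := pvPar u1 u2 x1 y1 hu hpar
    have ht0 : t ≠ 0 := by rintro rfl; exact ha ⟨by simp [ht1], by simp [ht2]⟩
    rw [ht1, ht2] at hbnd
    have htb := (hbndIff t).mp hbnd
    have htpos : 0 < t := lt_of_le_of_ne htb.1 (Ne.symm ht0)
    constructor
    · rw [ht1, ht2, pvRed_scale t u1 u2 htpos hu, hred2]
    · rw [ht1, ht2, hax2, hay2, abs_mul, abs_mul, abs_of_pos htpos]
      nlinarith [abs_nonneg u1, abs_nonneg u2, htb.2]
  · rintro ⟨hrd, hkey⟩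
    obtain ⟨g1, v1, v2, hred1, hx1, hy1, hg1, hv⟩ := pvRep x1 y1 ha
    have hveq : v1 = u1 ∧ v2 = u2 := by
      rw [hred1, hred2] at hrd
      exact ⟨congrArg Prod.fst hrd, congrArg Prod.snd hrd⟩
    rw [hveq.1] at hx1; rw [hveq.2] at hy1
    have hax1 : |x1| = g1 * |u1| := by rw [hx1, abs_mul, abs_of_pos hg1]
    have hay1 : |y1| = g1 * |u2| := by rw [hy1, abs_mul, abs_of_pos hg1]
    have hS : 0 < |u1| + |u2| := by
      rcases not_and_or.mp hu0 with h | h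
      · have := abs_pos.mpr h; nlinarith [abs_nonneg u2]
      · have := abs_pos.mpr h; nlinarith [abs_nonneg u1]
    have hg12 : g1 ≤ g2 := by
      rw [hax1, hay1, hax2, hay2] at hkey
      nlinarith
    refine ⟨by rw [hx1, hy1, hx2, hy2]; ring, ?_⟩
    rw [hx1, hy1]
    exact (hbndIff g1).mpr ⟨hg1.le, hg12⟩

lemma pvBetween_char (c p q : Int × Int) (hp : p ≠ c) (hq : q ≠ c) :
    check_if_between c p q = true ↔ (pvDir c q = pvDir c p ∧ pvKey c q ≤ pvKey c p) := by
  have ha := pv_ne_zero hq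
  have hb := pv_ne_zero hp
  have hcore := pvCore (q.1 - c.1) (q.2 - c.2) (p.1 - c.1) (p.2 - c.2) ha hb
  unfold pvDir pvKey
  rw [← hcore]
  simp only [check_if_between]
  by_cases h1 : (q.1 - c.1) * (p.2 - c.2) - (q.2 - c.2) * (p.1 - c.1) ≠ 0
  · simp only [if_pos h1]
    simp [h1]
  · rw [not_not] at h1
    rw [if_neg (by omega)]
    simp only [h1, true_and]
    constructor
    · intro h
      split_ifs at h with h2 h3 h4 <;> simp_all
    · intro h
      split_ifs at h with h2 h3 h4 <;> simp_all

lemma pvEqPt (c p q : Int × Int) (hp : p ≠ c) (hq : q ≠ c)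
    (hd : pvDir c q = pvDir c p) (hk : pvKey c q = pvKey c p) : q = p := by
  have ha := pv_ne_zero hq
  have hb := pv_ne_zero hp
  obtain ⟨g1, v1, v2, hred1, hx1, hy1, hg1, hv⟩ := pvRep (q.1 - c.1) (q.2 - c.2) ha
  obtain ⟨g2, u1, u2, hred2, hx2, hy2, hg2, hu⟩ := pvRep (p.1 - c.1) (p.2 - c.2) hb
  unfold pvDir at hd
  rw [hred1, hred2] at hd
  obtain ⟨e1, e2⟩ : v1 = u1 ∧ v2 = u2 := ⟨congrArg Prod.fst hd, congrArg Prod.snd hd⟩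
  subst e1; subst e2
  have hu0 : ¬(v1 = 0 ∧ v2 = 0) := by
    rintro ⟨e1, e2⟩; exact hb ⟨by rw [hx2, e1, mul_zero], by rw [hy2, e2, mul_zero]⟩
  have hS : 0 < |v1| + |v2| := by
    rcases not_and_or.mp hu0 with h | h
    · have := abs_pos.mpr h; nlinarith [abs_nonneg v2]
    · have := abs_pos.mpr h; nlinarith [abs_nonneg v1]
  unfold pvKey at hk
  rw [hx1, hy1, hx2, hy2] at hk
  rw [abs_mul, abs_mul, abs_mul, abs_mul, abs_of_pos hg1, abs_of_pos hg2] at hk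
  have hg : g1 = g2 := by nlinarith
  subst hg
  have e1 : q.1 = p.1 := by omega
  have e2 : q.2 = p.2 := by omega
  exact Prod.ext_iff.mpr ⟨e1, e2⟩

lemma obstacle_eq_find? (c p : Int × Int) (t : List (Int × Int)) :
    check_if_obstacle c p t =
      t.find? (fun q => !(decide (c = q)) && !(decide (p = q)) && check_if_between c p q) := by
  induction t with
  | nil => rfl
  | cons q t ih =>
    show (if c = q then check_if_obstacle c p t
          else if p = q then check_if_obstacle c p t
          else if check_if_between c p q then some q else check_if_obstacle c p t) = _
    by_cases h1 : c = q
    · rw [if_pos h1, ih, List.find?_cons_of_neg (by simp [h1])]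
    · by_cases h2 : p = q
      · rw [if_neg h1, if_pos h2, ih, List.find?_cons_of_neg (by simp [h2])]
      · by_cases h3 : check_if_between c p q
        · rw [if_neg h1, if_neg h2, if_pos h3, List.find?_cons_of_pos (by simp [h1, h2, h3])]
        · rw [if_neg h1, if_neg h2, if_neg h3, ih, List.find?_cons_of_neg (by simp [h1, h2, h3])]

lemma pvDirection_eq (c p : Int × Int) (h : p ≠ c) : pvDirection c p = pvDir c p := by
  have hpos : 0 < (Int.gcd (p.1 - c.1) (p.2 - c.2) : Int) := by
    have := Int.gcd_pos_iff.mpr (not_and_or.mp (pv_ne_zero h))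
    exact_mod_cast this
  unfold pvDirection pvDir pvRed
  dsimp only
  rw [PySem.Int.floordiv_eq_ediv_of_pos hpos, PySem.Int.floordiv_eq_ediv_of_pos hpos]

lemma pvSetdefault_eq {κ ν : Type} [BEq κ] (d : PySem.Dict κ ν) (k : κ) (v : ν) :
    d.setdefault k v = if d.contains k then d else d.insert k v := by
  by_cases h : d.contains k
  · simp [PySem.Dict.setdefault, h]
  · rw [if_neg h]
    have h' : d.contains k = false := by simp [h]
    apply PySem.Dict.ext
    rw [PySem.Dict.items_insert_of_not_contains d v h']
    simp [PySem.Dict.setdefault, h']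

def pvStepA (c : Int × Int) (s : List (Int × Int))
    (groups : PySem.Dict (Int × Int) (List (Int × Int))) (ip : Int × (Int × Int)) :
    PySem.Dict (Int × Int) (List (Int × Int)) :=
  if ip.2 = c then groups
  else
    groups.modify ((check_if_obstacle c ip.2 (PySem.List.slice s none (some ip.1))).getD ip.2) []
      (fun l => l ++ [ip.2])

def pvStepB (c : Int × Int)
    (st : PySem.Dict (Int × Int) (Int × Int) × PySem.Dict (Int × Int) (List (Int × Int)))
    (point : Int × Int) :
    PySem.Dict (Int × Int) (Int × Int) × PySem.Dict (Int × Int) (List (Int × Int)) :=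
  if point = c then st
  else
    (st.1.setdefault (pvDirection c point) point,
     st.2.modify ((st.1.get? (pvDirection c point)).getD point) [] (fun l => l ++ [point]))


lemma pvObKey (c p : Int × Int) (t : List (Int × Int)) (hp : p ≠ c)
    (hle : ∀ q ∈ t, pvKey c q ≤ pvKey c p)
    (hsort : t.Pairwise (fun a b => pvKey c a ≤ pvKey c b)) :
    (check_if_obstacle c p t).getD p =
      (t.find? (fun q => decide (q ≠ c) && decide (pvDir c q = pvDir c p))).getD p := by
  rw [obstacle_eq_find?]
  rcases hfd : t.find? (fun q => decide (q ≠ c) && decide (pvDir c q = pvDir c p)) with _ | q0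
  · have hnone := List.find?_eq_none.mp hfd
    have : t.find? (fun q => !(decide (c = q)) && !(decide (p = q)) && check_if_between c p q) = none := by
      rw [List.find?_eq_none]
      intro q hqin hPo
      simp only [Bool.and_eq_true, Bool.not_eq_true', decide_eq_false_iff_not] at hPo
      obtain ⟨⟨hqc, hqp⟩, hbtw⟩ := hPo
      have hqc' : q ≠ c := fun e => hqc e.symm
      have hd := ((pvBetween_char c p q hp hqc').mp hbtw).1
      exact hnone q hqin (by simp [hqc', hd])
    rw [this]
  · obtain ⟨hq0, t1, t2, hsplit, hbefore⟩ := List.find?_eq_some_iff_append.mp hfd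
    simp only [Bool.and_eq_true, decide_eq_true_eq] at hq0
    obtain ⟨hq0c, hq0d⟩ := hq0
    have hb1 : ∀ x ∈ t1, ¬(x ≠ c ∧ pvDir c x = pvDir c p) := by
      intro x hx hcon
      have h := hbefore x hx
      simp [hcon.1, hcon.2] at h
    by_cases hq0p : q0 = p
    · have : t.find? (fun q => !(decide (c = q)) && !(decide (p = q)) && check_if_between c p q) = none := by
        rw [List.find?_eq_none]
        intro q hqin hPo
        simp only [Bool.and_eq_true, Bool.not_eq_true', decide_eq_false_iff_not] at hPo
        obtain ⟨⟨hqc, hqp⟩, hbtw⟩ := hPo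
        have hqc' : q ≠ c := fun e => hqc e.symm
        have hqp' : q ≠ p := fun e => hqp e.symm
        obtain ⟨hd, hk⟩ := (pvBetween_char c p q hp hqc').mp hbtw
        rw [hsplit] at hqin
        rcases List.mem_append.mp hqin with h | h
        · exact hb1 q h ⟨hqc', hd⟩
        · rcases List.mem_cons.mp h with h | h
          · exact hqp' (h.trans hq0p)
          · have hpair : pvKey c p ≤ pvKey c q := by
              rw [hsplit] at hsort
              have h2 := (List.pairwise_append.mp hsort).2.1
              have h3 := (List.pairwise_cons.mp h2).1 q h
              rwa [hq0p] at h3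
            exact hqp' (pvEqPt c p q hp hqc' hd (le_antisymm hk hpair))
      rw [this]
      simp [hq0p]
    · have : t.find? (fun q => !(decide (c = q)) && !(decide (p = q)) && check_if_between c p q) = some q0 := by
        rw [hsplit, List.find?_append]
        have h1 : t1.find? (fun q => !(decide (c = q)) && !(decide (p = q)) && check_if_between c p q) = none := by
          rw [List.find?_eq_none]
          intro x hx hPo
          simp only [Bool.and_eq_true, Bool.not_eq_true', decide_eq_false_iff_not] at hPo
          obtain ⟨⟨hxc, hxp⟩, hbtw⟩ := hPo
          have hxc' : x ≠ c := fun e => hxc e.symm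
          have hd := ((pvBetween_char c p x hp hxc').mp hbtw).1
          exact hb1 x hx ⟨hxc', hd⟩
        rw [h1, Option.none_or]
        have hbtw : check_if_between c p q0 = true := by
          rw [pvBetween_char c p q0 hp hq0c]
          exact ⟨hq0d, hle q0 (by rw [hsplit]; exact List.mem_append.mpr (Or.inr (List.mem_cons_self)))⟩
        rw [List.find?_cons_of_pos (by simp [hbtw]; exact ⟨fun e => hq0c e.symm, fun e => hq0p e.symm⟩)]
      rw [this]

lemma pvLoopEq (c : Int × Int) (s : List (Int × Int))
    (hsort : s.Pairwise (fun a b => pvKey c a ≤ pvKey c b)) :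
    ∀ (rest done : List (Int × Int)), s = done ++ rest →
    ∀ (kd : PySem.Dict (Int × Int) (Int × Int)) (gd : PySem.Dict (Int × Int) (List (Int × Int))),
    (∀ d, kd.get? d = done.find? (fun q => decide (q ≠ c) && decide (pvDir c q = d))) →
    (PySem.List.enumerate rest (done.length : Int)).foldl (pvStepA c s) gd
      = (rest.foldl (pvStepB c) (kd, gd)).2 := by
  intro rest
  induction rest with
  | nil =>
    intro done hs kd gd hkd
    simp [PySem.List.enumerate]
  | cons x rest ih =>
    intro done hs kd gd hkd
    rw [PySem.List.enumerate_cons]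
    simp only [List.foldl_cons]
    have hlen : ((done.length : Int) + 1) = (((done ++ [x]).length : Nat) : Int) := by
      simp
    by_cases hx : x = c
    · have hA : pvStepA c s gd ((done.length : Int), x) = gd := by
        simp [pvStepA, hx]
      have hB : pvStepB c (kd, gd) x = (kd, gd) := by
        simp only [pvStepB]
        rw [if_pos hx]
      rw [hA, hB, hlen]
      apply ih (done ++ [x]) (by rw [hs, List.append_assoc]; rfl) kd gd
      intro d
      rw [List.find?_append]
      have : [x].find? (fun q => decide (q ≠ c) && decide (pvDir c q = d)) = none := by
        simp [hx]
      rw [this, Option.or_none]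
      exact hkd d
    · -- the processed prefix is exactly done
      have hslice : PySem.List.slice s none (some ((done.length : Nat) : Int)) = done := by
        rw [PySem.List.slice_to_natCast, hs, List.take_left]
      have hsortd : done.Pairwise (fun a b => pvKey c a ≤ pvKey c b) := by
        rw [hs] at hsort
        exact (List.pairwise_append.mp hsort).1
      have hle : ∀ q ∈ done, pvKey c q ≤ pvKey c x := by
        intro q hq
        rw [hs] at hsort
        exact (List.pairwise_append.mp hsort).2.2 q hq x List.mem_cons_self
      have hkey : (check_if_obstacle c x (PySem.List.slice s none (some (done.length : Int)))).getD x
          = (kd.get? (pvDirection c x)).getD x := by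
        rw [hslice, pvObKey c x done hx hle hsortd, pvDirection_eq c x hx, hkd (pvDir c x)]
      have hA : pvStepA c s gd ((done.length : Int), x)
          = gd.modify ((kd.get? (pvDirection c x)).getD x) [] (fun l => l ++ [x]) := by
        simp only [pvStepA]
        rw [if_neg hx, hkey]
      have hB : pvStepB c (kd, gd) x
          = (kd.setdefault (pvDirection c x) x,
             gd.modify ((kd.get? (pvDirection c x)).getD x) [] (fun l => l ++ [x])) := by
        simp only [pvStepB]
        rw [if_neg hx]
      rw [hA, hB, hlen]
      apply ih (done ++ [x]) (by rw [hs, List.append_assoc]; rfl)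
      intro d
      rw [pvSetdefault_eq, List.find?_append]
      by_cases hdx : d = pvDir c x
      · have hfx : [x].find? (fun q => decide (q ≠ c) && decide (pvDir c q = d)) = some x := by
          simp [hx, hdx]
        rw [hfx]
        rw [pvDirection_eq c x hx, ← hdx]
        by_cases hc : kd.contains d
        · rw [if_pos hc]
          have hsome : (kd.get? d).isSome := by
            rw [← PySem.Dict.contains_eq_isSome_get?]; exact hc
          rcases ho : kd.get? d with _ | q
          · rw [ho] at hsome; simp at hsome
          · rw [hkd d] at ho
            rw [ho, Option.some_or]
        · rw [if_neg hc]
          have hnone : kd.get? d = none := by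
            rw [← Option.not_isSome_iff_eq_none, ← PySem.Dict.contains_eq_isSome_get?]
            simpa using hc
          rw [PySem.Dict.get?_insert, if_pos rfl]
          rw [← hkd d, hnone, Option.none_or]
      · have hfx : [x].find? (fun q => decide (q ≠ c) && decide (pvDir c q = d)) = none := by
          simp [hx]
          exact fun h => hdx h.symm
        rw [hfx, Option.or_none, ← hkd d]
        by_cases hc : kd.contains (pvDirection c x)
        · rw [if_pos hc]
        · rw [if_neg hc, PySem.Dict.get?_insert, if_neg (by rw [pvDirection_eq c x hx]; exact hdx)]

-- ===== VERDICT (by name: the statement is the Claim_ definition above) =====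
theorem compute_groups_spec : Claim_equal_compute_groups := by
  intro current points _
  unfold Spec_compute_groups
  show compute_groups current points = compute_groups_alt current points
  exact congrArg (fun d : PySem.Dict (Int × Int) (List (Int × Int)) =>
      d.items.map (fun kv => (kv.1.1, kv.1.2, kv.2)))
    (pvLoopEq current _ (PySem.List.sorted_pairwise points _) _ [] rfl
      PySem.Dict.empty PySem.Dict.empty (fun d => by simp))
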